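-- pv_equiv track=rewrite | github.com/sananlb/Expense_bot | bot/utils/logging_safe.py | sanitize_callback_action
-- ===== SOURCE A (Python) =====
-- def sanitize_callback_action(callback_data: str | None) -> tuple[str, bool]:
--     """Extract a stable action name without leaking callback params/tokens."""
--     if not callback_data:
--         return "", False
--
--     if ":" in callback_data:
--         action, _ = callback_data.split(":", 1)
--         return action, True
--
--     parts = callback_data.split("_")
--     param_start_idx = len(parts)
--     for index in range(len(parts) - 1, -1, -1):
--         if parts[index].isdigit():
--             param_start_idx = index
--         else:
--             break
--
--     if param_start_idx < len(parts):
--         return "_".join(parts[:param_start_idx]), True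
--
--     return callback_data, False
-- ===== SOURCE B (Python) =====
-- def sanitize_callback_action(callback_data):
--     """Extract a stable action name without leaking callback params/tokens."""
--     if not callback_data:
--         return "", False
--
--     if ":" in callback_data:
--         return callback_data.split(":", 1)[0], True
--
--     def trim(rev, stripped):
--         # rev is the remaining candidate name, reversed (a list of chars).
--         # Peel one trailing underscore-plus-digits group per call; no splitting involved.
--         i = 0
--         while i < len(rev) and rev[i].isdigit():
--             i += 1
--         if i == 0:
--             return rev, stripped
--         if i == len(rev):
--             return [], True
--         if rev[i] == "_":
--             return trim(rev[i + 1:], True)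
--         return rev, stripped
--
--     rev, stripped = trim(list(reversed(callback_data)), False)
--     if stripped:
--         return "".join(reversed(rev)), True
--     return callback_data, False
-- ===== Notes on version B (the rewrite author's own statement) =====
-- stated objective: alternative
-- what changed: Instead of splitting on the underscore separator and scanning the resulting parts list for the trailing digit run, B never splits at all: it recursively peels trailing underscore-plus-digits groups off the reversed character sequence, one group per recursive call, and reassembles the remainder.
import Mathlib
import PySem

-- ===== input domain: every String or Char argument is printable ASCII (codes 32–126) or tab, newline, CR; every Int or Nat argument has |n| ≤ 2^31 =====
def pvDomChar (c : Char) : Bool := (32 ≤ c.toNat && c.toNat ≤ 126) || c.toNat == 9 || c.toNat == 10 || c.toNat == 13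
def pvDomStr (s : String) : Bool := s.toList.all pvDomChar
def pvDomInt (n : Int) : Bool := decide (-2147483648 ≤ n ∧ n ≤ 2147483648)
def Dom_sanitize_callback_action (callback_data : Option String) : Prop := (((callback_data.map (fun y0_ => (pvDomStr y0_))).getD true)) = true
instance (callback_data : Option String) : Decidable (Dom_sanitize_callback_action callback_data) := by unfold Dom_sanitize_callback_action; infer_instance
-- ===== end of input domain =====

-- B does not split on '_' at all: it recursively peels trailing underscore-plus-digits groups off the
-- reversed character sequence, one group per recursive call (alternative decomposition, same cost).

-- ===== PORT A =====
-- A's loop: for index in range(len(parts)-1, -1, -1): if parts[index].isdigit(): param_start_idx = index else: break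
def pvAScan (parts : List String) : List Int → Int → Int
  | [], idx => idx
  | i :: rest, idx =>
    match PySem.List.pyGet? parts i with
    | none => idx   -- unreachable: every i comes from range(len(parts)-1, -1, -1)
    | some p => if PySem.Str.strIsdigit p then pvAScan parts rest i else idx

def sanitize_callback_action (callback_data : Option String) : String × Bool :=
  match callback_data with
  | none => ("", false)
  | some s =>
    if s = "" then ("", false)
    else if PySem.Str.isIn ":" s then
      (((PySem.Str.splitMax? s ":" 1).getD []).headD "", true)
    else
      let parts := (PySem.Str.split? s "_").getD []
      let idx := pvAScan parts (PySem.List.pyRange ((parts.length : Int) - 1) (-1) (-1)) (parts.length : Int)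
      if idx < (parts.length : Int) then
        (PySem.Str.join "_" (PySem.List.slice parts none (some idx)), true)
      else (s, false)

-- ===== PORT B =====
-- Source B's inner 'i = 0; while i < len(rev) and rev[i].isdigit(): i += 1' (leading digit-run counter)
def pvDigRun : List Char → Nat
  | [] => 0
  | c :: rest => if PySem.Chars.isdigit c then pvDigRun rest + 1 else 0

theorem pvDigRun_le (l : List Char) : pvDigRun l ≤ l.length := by
  induction l with
  | nil => simp [pvDigRun]
  | cons c rest ih => simp only [pvDigRun, List.length_cons]; split <;> omega

-- Source B's recursive 'trim(rev, stripped)' on the reversed character list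
def pvTrim (rev : List Char) (stripped : Bool) : List Char × Bool :=
  let i := pvDigRun rev
  if h0 : i = 0 then (rev, stripped)
  else if h1 : i = rev.length then ([], true)
  else if rev.getD i ' ' = '_' then pvTrim (rev.drop (i + 1)) true
  else (rev, stripped)
termination_by rev.length
decreasing_by
  have h := pvDigRun_le rev
  simp only [List.length_drop]
  omega

def sanitize_callback_action_alt (callback_data : Option String) : String × Bool :=
  match callback_data with
  | none => ("", false)
  | some s =>
    if s = "" then ("", false)
    else if PySem.Str.isIn ":" s then
      (((PySem.Str.splitMax? s ":" 1).getD []).headD "", true)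
    else
      let r := pvTrim s.toList.reverse false
      if r.2 then (String.ofList r.1.reverse, true) else (s, false)

-- ===== PRECONDITION & SPEC =====
def Spec_sanitize_callback_action (callback_data : Option String) (out : String × Bool) : Prop := out = sanitize_callback_action_alt callback_data
instance (callback_data : Option String) (out : String × Bool) : Decidable (Spec_sanitize_callback_action callback_data out) := by unfold Spec_sanitize_callback_action; infer_instance

-- ===== CLAIM (what is proved, stated in full; the proofs are below) =====
def Claim_equal_sanitize_callback_action : Prop := ∀ (callback_data : Option String), Dom_sanitize_callback_action callback_data → Spec_sanitize_callback_action callback_data (sanitize_callback_action callback_data)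

-- ===== LEMMAS AND PROOFS =====

-- trailing-digit-run length of a list of String parts (A-side invariant)
def pvTW (l : List String) : Nat := (l.reverse.takeWhile PySem.Str.strIsdigit).length

theorem pvRangeDown_succ (m : Nat) :
    PySem.List.pyRange (m : Int) (-1) (-1) = (m : Int) :: PySem.List.pyRange ((m : Int) - 1) (-1) (-1) := by
  simp only [PySem.List.pyRange]
  norm_num
  rw [if_pos (by omega : (-1 : Int) < (m : Int))]
  rcases Nat.eq_zero_or_pos m with hm | hm
  · subst hm; simp
  · rw [if_pos hm, List.range_succ_eq_map, List.map_cons, List.map_map]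
    refine congrArg₂ _ (by norm_num) ?_
    refine List.map_congr_left ?_
    intro k _
    simp only [Function.comp_apply]
    push_cast
    ring

theorem pvAScan_eq (parts : List String) (n : Nat) (hn : n ≤ parts.length) :
    pvAScan parts (PySem.List.pyRange ((n : Int) - 1) (-1) (-1)) (n : Int)
      = (n : Int) - pvTW (parts.take n) := by
  induction n with
  | zero => simp [pvAScan, pvTW]
  | succ m ih =>
    have hm : m < parts.length := by omega
    have hc : ((m + 1 : Nat) : Int) - 1 = (m : Int) := by push_cast; ring
    rw [hc, pvRangeDown_succ m]
    have hget : PySem.List.pyGet? parts (m : Int) = some parts[m] := by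
      simp [PySem.List.pyGet?_natCast, List.getElem?_eq_getElem hm]
    have htake : parts.take (m + 1) = parts.take m ++ [parts[m]] := by
      rw [List.take_add_one, List.getElem?_eq_getElem hm]; rfl
    by_cases hd : PySem.Str.strIsdigit parts[m]
    · have htw : pvTW (parts.take (m + 1)) = pvTW (parts.take m) + 1 := by
        simp only [pvTW, htake, List.reverse_append, List.reverse_cons, List.reverse_nil,
          List.nil_append, List.singleton_append, List.takeWhile_cons, hd, if_true,
          List.length_cons]
      rw [htw]
      simp only [pvAScan, hget]
      rw [if_pos hd, ih (by omega)]
      push_cast; ring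
    · have htw : pvTW (parts.take (m + 1)) = 0 := by
        simp only [pvTW, htake, List.reverse_append, List.reverse_cons, List.reverse_nil,
          List.nil_append, List.singleton_append, List.takeWhile_cons]
        rw [if_neg hd]; rfl
      rw [htw]
      simp only [pvAScan, hget]
      rw [if_neg hd]
      push_cast; ring

-- fuel-free model of PySem.Chars.splitOn for the single-char separator '_'
def pvSp : List Char → List Char → List (List Char)
  | [], cur => [cur.reverse]
  | c :: rest, cur => if c = '_' then cur.reverse :: pvSp rest [] else pvSp rest (c :: cur)

theorem pvGo_eq (fuel : Nat) (l cur : List Char) (acc : List (List Char)) (h : l.length < fuel) :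
    PySem.Chars.splitOn.go ['_'] fuel l cur acc = acc.reverse ++ pvSp l cur := by
  induction fuel generalizing l cur acc with
  | zero => omega
  | succ f ih =>
    cases l with
    | nil => simp [PySem.Chars.splitOn.go, pvSp]
    | cons c rest =>
      simp only [PySem.Chars.splitOn.go, List.isPrefixOf, Bool.and_true]
      by_cases hc : c = '_'
      · subst hc
        rw [if_pos (by simp)]
        simp only [List.length_cons, List.length_nil,
          List.drop_succ_cons, List.drop_zero]
        rw [ih rest [] _ (by simpa using Nat.lt_of_succ_lt_succ h)]
        simp [pvSp]
      · rw [if_neg (by simpa using fun h' => hc h'.symm)]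
        rw [ih rest (c :: cur) acc (by simpa using Nat.lt_of_succ_lt_succ h)]
        simp [pvSp, hc]

theorem pvSplitOn_eq (cs : List Char) : PySem.Chars.splitOn cs ['_'] = pvSp cs [] := by
  unfold PySem.Chars.splitOn
  rw [pvGo_eq _ _ _ _ (by omega)]
  simp

theorem pvSp_ne_nil (l cur : List Char) : pvSp l cur ≠ [] := by
  induction l generalizing cur with
  | nil => simp [pvSp]
  | cons c rest ih => simp only [pvSp]; split <;> simp [ih]

theorem pvJoin_pvSp (l : List Char) (cur : List Char) :
    PySem.Chars.join ['_'] (pvSp l cur) = cur.reverse ++ l := by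
  induction l generalizing cur with
  | nil => simp [pvSp, PySem.Chars.join_singleton]
  | cons c rest ih =>
    simp only [pvSp]
    by_cases hc : c = '_'
    · subst hc
      rw [if_pos rfl]
      cases hq : pvSp rest [] with
      | nil => exact absurd hq (pvSp_ne_nil rest [])
      | cons q t =>
        rw [PySem.Chars.join_cons_cons]
        have := ih ([] : List Char)
        rw [hq] at this
        simp [this]
    · rw [if_neg hc, ih (c :: cur)]
      simp

theorem pvSp_no_us (l cur : List Char) (hcur : '_' ∉ cur) :
    ∀ p ∈ pvSp l cur, '_' ∉ p := by
  induction l generalizing cur with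
  | nil => simpa [pvSp] using hcur
  | cons c rest ih =>
    simp only [pvSp]
    by_cases hc : c = '_'
    · subst hc
      rw [if_pos rfl]
      intro p hp
      rcases List.mem_cons.mp hp with h | h
      · subst h; simpa using hcur
      · exact ih [] (by simp) p h
    · rw [if_neg hc]
      refine ih (c :: cur) ?_
      simp only [List.mem_cons, not_or]
      exact ⟨fun h => hc h.symm, hcur⟩

-- char-level trailing-digit-run count of a parts list
def pvTwC (ps : List (List Char)) : Nat := (ps.reverse.takeWhile PySem.Chars.strIsdigit).length

theorem pvTwC_le (ps : List (List Char)) : pvTwC ps ≤ ps.length := by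
  have h := (List.takeWhile_prefix (l := ps.reverse) PySem.Chars.strIsdigit).length_le
  simpa [pvTwC] using h

theorem pvTW_map (ps : List (List Char)) : pvTW (ps.map String.ofList) = pvTwC ps := by
  have hf : PySem.Str.strIsdigit ∘ String.ofList = PySem.Chars.strIsdigit := by
    funext p; simp [PySem.Str.strIsdigit, String.toList_ofList]
  simp [pvTW, pvTwC, ← List.map_reverse, List.takeWhile_map, hf]

theorem pvDigRun_eq (l : List Char) :
    pvDigRun l = (l.takeWhile PySem.Chars.isdigit).length := by
  induction l with
  | nil => simp [pvDigRun]
  | cons c rest ih =>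
    simp only [pvDigRun, List.takeWhile_cons]
    split <;> simp_all

-- a part that is not all-digits (or is empty), followed by nothing or '_'…: trim stops
theorem pvTrim_stop (p : List Char) (hnd : PySem.Chars.strIsdigit p = false) (hu : '_' ∉ p)
    (rest : List Char) (hrest : rest = [] ∨ ∃ t, rest = '_' :: t) (b : Bool) :
    pvTrim (p.reverse ++ rest) b = (p.reverse ++ rest, b) := by
  by_cases hp : p = []
  · subst hp
    rcases hrest with h | ⟨t, h⟩ <;> subst h <;>
      · rw [pvTrim]
        simp [pvDigRun, PySem.Chars.isdigit]
  · have hnall : ¬ ∀ c ∈ p.reverse, PySem.Chars.isdigit c = true := by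
      intro hall
      have : PySem.Chars.strIsdigit p = true := by
        simp only [PySem.Chars.strIsdigit, Bool.and_eq_true, Bool.not_eq_true',
          List.isEmpty_eq_false_iff, List.all_eq_true]
        exact ⟨hp, fun c hc => hall c (List.mem_reverse.mpr hc)⟩
      rw [this] at hnd; exact Bool.noConfusion hnd
    have htkne : (p.reverse.takeWhile PySem.Chars.isdigit).length ≠ p.reverse.length := by
      intro hlen
      have heq : p.reverse.takeWhile PySem.Chars.isdigit = p.reverse :=
        (List.takeWhile_prefix _).eq_of_length hlen
      exact hnall (fun c hc => List.mem_takeWhile_imp (heq ▸ hc))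
    have htkle := (List.takeWhile_prefix (l := p.reverse) PySem.Chars.isdigit).length_le
    have hi : pvDigRun (p.reverse ++ rest) = (p.reverse.takeWhile PySem.Chars.isdigit).length := by
      rw [pvDigRun_eq, List.takeWhile_append, if_neg htkne]
    set i := (p.reverse.takeWhile PySem.Chars.isdigit).length with hidef
    have hilt : i < p.reverse.length := by omega
    have hilt' : i < p.length := by simpa using hilt
    rw [pvTrim]
    simp only [hi]
    by_cases h0 : i = 0
    · rw [dif_pos h0]
    · rw [dif_neg h0,
        dif_neg (by simp only [List.length_append, List.length_reverse]; omega)]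
      have hget : (p.reverse ++ rest).getD i ' ' = p.reverse.getD i ' ' :=
        List.getD_append _ _ _ _ hilt
      have hmem : p.reverse.getD i ' ' ∈ p.reverse := by
        rw [List.getD_eq_getElem?_getD, List.getElem?_eq_getElem hilt]
        exact List.getElem_mem _
      have hne : (p.reverse ++ rest).getD i ' ' ≠ '_' := by
        rw [hget]; intro hc
        exact hu (List.mem_reverse.mp (hc ▸ hmem))
      rw [if_neg hne]

theorem pvJoin_append_singleton (init : List (List Char)) (p : List Char) (h : init ≠ []) :
    PySem.Chars.join ['_'] (init ++ [p]) = PySem.Chars.join ['_'] init ++ '_' :: p := by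
  induction init with
  | nil => exact absurd rfl h
  | cons q t ih =>
    cases t with
    | nil => simp [PySem.Chars.join_cons_cons, PySem.Chars.join_singleton]
    | cons r t' =>
      have h2 := ih (by simp)
      simp only [List.cons_append, PySem.Chars.join_cons_cons] at h2 ⊢
      rw [h2]
      simp [List.append_assoc]

theorem pvTwC_append_digit (init : List (List Char)) (p : List Char)
    (hd : PySem.Chars.strIsdigit p = true) : pvTwC (init ++ [p]) = pvTwC init + 1 := by
  simp [pvTwC, hd]

theorem pvTwC_append_nondigit (init : List (List Char)) (p : List Char)
    (hd : PySem.Chars.strIsdigit p = false) : pvTwC (init ++ [p]) = 0 := by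
  simp [pvTwC, hd]

-- the heart: B's reversed peel, applied to '_'.join(parts), strips exactly the trailing digit parts
theorem pvTrim_join (ps : List (List Char)) (hne : ps ≠ []) (hu : ∀ p ∈ ps, '_' ∉ p) (b : Bool) :
    pvTrim (PySem.Chars.join ['_'] ps).reverse b
      = if pvTwC ps = 0 then ((PySem.Chars.join ['_'] ps).reverse, b)
        else ((PySem.Chars.join ['_'] (ps.take (ps.length - pvTwC ps))).reverse, true) := by
  induction ps using List.reverseRecOn generalizing b with
  | nil => exact absurd rfl hne
  | append_singleton init p ih =>
    have hup : '_' ∉ p := hu p (by simp)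
    by_cases hd : PySem.Chars.strIsdigit p = true
    · -- p is a nonempty all-digit part
      have hpa : ¬p = [] ∧ ∀ x ∈ p, PySem.Chars.isdigit x = true := by
        simpa [PySem.Chars.strIsdigit] using hd
      have hpne : p ≠ [] := hpa.1
      have hall : ∀ c ∈ p.reverse, PySem.Chars.isdigit c = true :=
        fun c hc => hpa.2 c (List.mem_reverse.mp hc)
      have htwc := pvTwC_append_digit init p hd
      cases init with
      | nil =>
        -- single all-digit part: everything is stripped
        have hrun : pvDigRun p.reverse = p.reverse.length := by
          rw [pvDigRun_eq, List.takeWhile_eq_self_iff.mpr hall]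
        rw [pvTrim]
        simp only [List.nil_append, PySem.Chars.join_singleton, hrun]
        rw [dif_neg (by simpa using hpne), dif_pos trivial]
        simp [pvTwC, hd, PySem.Chars.join_nil]
      | cons q t =>
        have hinit : (q :: t : List (List Char)) ≠ [] := by simp
        have hjoin := pvJoin_append_singleton (q :: t) p hinit
        set J := PySem.Chars.join ['_'] (q :: t) with hJ
        have hrev : (PySem.Chars.join ['_'] ((q :: t) ++ [p])).reverse
            = p.reverse ++ '_' :: J.reverse := by
          rw [hjoin]; simp
        have hrun : pvDigRun (p.reverse ++ '_' :: J.reverse) = p.length := by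
          rw [pvDigRun_eq, List.takeWhile_append,
            if_pos (by rw [List.takeWhile_eq_self_iff.mpr hall]),
            List.takeWhile_cons]
          simp [PySem.Chars.isdigit]
        rw [hrev, pvTrim]
        simp only [hrun]
        have hne1 : ¬ p.length = 0 := by simpa using hpne
        have hne2 : ¬ p.length = (p.reverse ++ '_' :: J.reverse).length := by
          simp
        rw [dif_neg hne1, dif_neg hne2]
        have hget : (p.reverse ++ '_' :: J.reverse).getD p.length ' ' = '_' := by
          have hlr : p.reverse.length ≤ p.length := by simp
          rw [List.getD_eq_getElem?_getD, List.getElem?_append_right hlr]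
          simp
        rw [if_pos hget]
        have hdrop : (p.reverse ++ '_' :: J.reverse).drop (p.length + 1) = J.reverse := by
          rw [show p.length + 1 = p.reverse.length + 1 by simp,
            List.drop_length_add_append]
          simp
        rw [hdrop, ih hinit (fun x hx => hu x (by simp [List.mem_append] at hx ⊢; tauto)) true]
        have hle := pvTwC_le (q :: t)
        rw [htwc]
        rw [if_neg (by omega : ¬ pvTwC (q :: t) + 1 = 0)]
        have hlen : ((q :: t) ++ [p]).length - (pvTwC (q :: t) + 1)
            = (q :: t).length - pvTwC (q :: t) := by
          simp only [List.length_append, List.length_cons, List.length_nil]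
          omega
        rw [hlen]
        have htake : ((q :: t) ++ [p]).take ((q :: t).length - pvTwC (q :: t))
            = (q :: t).take ((q :: t).length - pvTwC (q :: t)) :=
          List.take_append_of_le_length (by omega)
        rw [htake]
        by_cases h0 : pvTwC (q :: t) = 0
        · rw [if_pos h0, h0]
          simp [hJ]
        · rw [if_neg h0]
    · -- last part not an all-digit part: nothing is stripped
      have hd' : PySem.Chars.strIsdigit p = false := by simpa using hd
      have htwc := pvTwC_append_nondigit init p hd'
      rw [htwc, if_pos rfl]
      cases init with
      | nil =>
        simp only [List.nil_append, PySem.Chars.join_singleton]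
        have := pvTrim_stop p hd' hup [] (Or.inl rfl) b
        simpa using this
      | cons q t =>
        have hjoin := pvJoin_append_singleton (q :: t) p (by simp)
        have hrev : (PySem.Chars.join ['_'] ((q :: t) ++ [p])).reverse
            = p.reverse ++ '_' :: (PySem.Chars.join ['_'] (q :: t)).reverse := by
          rw [hjoin]; simp
        rw [hrev]
        exact pvTrim_stop p hd' hup _ (Or.inr ⟨_, rfl⟩) b

-- the underscore branch of both ports, assembled
theorem pv_branch (s : String) :
    (let parts := (PySem.Str.split? s "_").getD [];
     let idx := pvAScan parts (PySem.List.pyRange ((parts.length : Int) - 1) (-1) (-1)) (parts.length : Int);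
     if idx < (parts.length : Int) then
       (PySem.Str.join "_" (PySem.List.slice parts none (some idx)), true)
     else (s, false))
    = (let r := pvTrim s.toList.reverse false;
       if r.2 then (String.ofList r.1.reverse, true) else (s, false)) := by
  show (if pvAScan ((PySem.Str.split? s "_").getD [])
        (PySem.List.pyRange (((((PySem.Str.split? s "_").getD []).length) : Int) - 1) (-1) (-1))
        ((((PySem.Str.split? s "_").getD []).length) : Int)
        < ((((PySem.Str.split? s "_").getD []).length) : Int) then
      (PySem.Str.join "_" (PySem.List.slice ((PySem.Str.split? s "_").getD []) none
        (some (pvAScan ((PySem.Str.split? s "_").getD [])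
          (PySem.List.pyRange (((((PySem.Str.split? s "_").getD []).length) : Int) - 1) (-1) (-1))
          ((((PySem.Str.split? s "_").getD []).length) : Int)))), true)
    else (s, false))
    = (if (pvTrim s.toList.reverse false).2
       then (String.ofList (pvTrim s.toList.reverse false).1.reverse, true) else (s, false))
  set ps := pvSp s.toList [] with hps
  have hpsne : ps ≠ [] := pvSp_ne_nil s.toList []
  have hpu : ∀ p ∈ ps, '_' ∉ p := pvSp_no_us s.toList [] (by simp)
  have hjoin : PySem.Chars.join ['_'] ps = s.toList := by
    have := pvJoin_pvSp s.toList []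
    simpa [hps] using this
  have hparts : (PySem.Str.split? s "_").getD [] = ps.map String.ofList := by
    simp [PySem.Str.split?, PySem.Chars.split?, pvSplitOn_eq, hps]
  have htwle := pvTwC_le ps
  have htrim := pvTrim_join ps hpsne hpu false
  rw [hjoin] at htrim
  rw [hparts, pvAScan_eq _ _ le_rfl, List.take_length, pvTW_map, htrim]
  simp only [List.length_map]
  by_cases h0 : pvTwC ps = 0
  · rw [if_pos h0, if_neg (by omega)]
    simp
  · rw [if_neg h0, if_pos (by omega)]
    simp only [List.reverse_reverse]
    have hcast : (ps.length : Int) - (pvTwC ps : Int) = ((ps.length - pvTwC ps : Nat) : Int) := by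
      push_cast [Nat.cast_sub htwle]; ring
    rw [hcast, PySem.List.slice_to_natCast, ← List.map_take]
    have hjoinmap : PySem.Str.join "_" ((ps.take (ps.length - pvTwC ps)).map String.ofList)
        = String.ofList (PySem.Chars.join ['_'] (ps.take (ps.length - pvTwC ps))) := by
      simp only [PySem.Str.join, List.map_map]
      congr 2
      simp [Function.comp_def, String.toList_ofList]
    rw [hjoinmap]
    simp

-- ===== VERDICT (by name: the statement is the Claim_ definition above) =====
theorem sanitize_callback_action_spec : Claim_equal_sanitize_callback_action := by
  intro cd _
  unfold Spec_sanitize_callback_action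
  cases cd with
  | none => rfl
  | some s =>
    simp only [sanitize_callback_action, sanitize_callback_action_alt]
    by_cases h0 : s = ""
    · rw [if_pos h0, if_pos h0]
    · rw [if_neg h0, if_neg h0]
      by_cases h1 : PySem.Str.isIn ":" s
      · rw [if_pos h1, if_pos h1]
      · rw [if_neg h1, if_neg h1]
        exact pv_branch s
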